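-- pv_equiv track=rewrite | github.com/odf/pydeltamesh | src/optimize.py | _selections
-- ===== SOURCE A (Python) =====
-- def _selections(a, n):
--     if n <= 0:
--         yield []
--     else:
--         a = list(a)
--         for i in range(len(a)):
--             for s in _selections(a[:i] + a[i + 1:], n - 1):
--                 yield [a[i]] + s
-- ===== SOURCE B (Python) =====
-- def _selections(a, n):
--     if n <= 0:
--         yield []
--         return
--     pool = list(a)
--     if n > len(pool):
--         return
--     states = [([], pool)]
--     for _ in range(n):
--         states = [(chosen + [rest[i]], rest[:i] + rest[i + 1:])
--                   for chosen, rest in states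
--                   for i in range(len(rest))]
--     for chosen, _ in states:
--         yield chosen
-- ===== Notes on version B (the rewrite author's own statement) =====
-- stated objective: alternative
-- what changed: Replaces A's depth-first recursive generator with an iterative breadth-first loop that expands a list of (chosen, remaining) states level by level for n rounds, plus an explicit early exit when n exceeds the pool size; the yielded sequence is identical.
import Mathlib
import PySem

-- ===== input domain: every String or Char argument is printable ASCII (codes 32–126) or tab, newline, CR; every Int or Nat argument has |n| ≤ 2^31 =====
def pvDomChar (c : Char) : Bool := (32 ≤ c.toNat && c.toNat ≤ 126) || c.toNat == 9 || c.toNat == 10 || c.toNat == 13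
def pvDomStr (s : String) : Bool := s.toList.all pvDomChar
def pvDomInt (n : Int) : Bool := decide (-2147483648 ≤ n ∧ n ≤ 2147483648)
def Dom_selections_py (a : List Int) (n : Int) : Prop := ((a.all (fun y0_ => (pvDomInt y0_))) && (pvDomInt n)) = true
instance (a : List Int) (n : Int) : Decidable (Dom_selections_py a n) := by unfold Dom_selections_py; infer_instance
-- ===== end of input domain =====

-- B replaces A's recursive generator with an iterative level-by-level expansion of
-- (chosen, remaining) states; same return sequence, different decomposition (objective: alternative).
-- Both A and B are Python generators; equivalence is about the sequence of yielded values.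

-- ===== PORT A =====
-- A: if n <= 0: yield [] else: for i in range(len(a)): for s in _selections(a[:i]+a[i+1:], n-1): yield [a[i]] + s
def selections_py (a : List Int) (n : Int) : List (List Int) :=
  if n ≤ 0 then [[]]
  else
    (PySem.List.pyRange 0 a.length 1).flatMap (fun i =>
      (selections_py
          (PySem.List.slice a none (some i) ++ PySem.List.slice a (some (i + 1)) none)
          (n - 1)).map
        (fun s => [PySem.List.pyGetD a i 0] ++ s))
termination_by n.toNat
decreasing_by omega

-- ===== PORT B =====
-- one loop iteration: states = [(chosen + [rest[i]], rest[:i] + rest[i+1:]) for chosen, rest in states for i in range(len(rest))]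
def pvStep (states : List (List Int × List Int)) : List (List Int × List Int) :=
  states.flatMap (fun cr =>
    (PySem.List.pyRange 0 cr.2.length 1).map (fun i =>
      (cr.1 ++ [PySem.List.pyGetD cr.2 i 0],
       PySem.List.slice cr.2 none (some i) ++ PySem.List.slice cr.2 (some (i + 1)) none)))

-- the 'for _ in range(n)' loop
def pvExpand : Nat → List (List Int × List Int) → List (List Int × List Int)
  | 0, st => st
  | k + 1, st => pvExpand k (pvStep st)

def selections_py_alt (a : List Int) (n : Int) : List (List Int) :=
  if n ≤ 0 then [[]]
  else if (a.length : Int) < n then []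
  else (pvExpand n.toNat [([], a)]).map Prod.fst

-- ===== PRECONDITION & SPEC =====
def Spec_selections_py (a : List Int) (n : Int) (out : List (List Int)) : Prop := out = selections_py_alt a n
instance (a : List Int) (n : Int) (out : List (List Int)) : Decidable (Spec_selections_py a n out) := by unfold Spec_selections_py; infer_instance

-- ===== CLAIM (what is proved, stated in full; the proofs are below) =====
def Claim_equal_selections_py : Prop := ∀ (a : List Int) (n : Int), Dom_selections_py a n → Spec_selections_py a n (selections_py a n)

-- ===== LEMMAS AND PROOFS =====

-- the list a[:i] + a[i+1:] for an index 0 ≤ i < len(a), as drop/take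
theorem pvErase_eq (a : List Int) (i : Int) (h0 : 0 ≤ i) :
    PySem.List.slice a none (some i) ++ PySem.List.slice a (some (i + 1)) none
      = a.take i.toNat ++ a.drop (i.toNat + 1) := by
  rw [PySem.List.slice_to a h0, PySem.List.slice_from a (by omega : (0:Int) ≤ i + 1)]
  have h1 : (i + 1).toNat = i.toNat + 1 := by omega
  rw [h1]

theorem pvErase_length (a : List Int) (i : Int) (h0 : 0 ≤ i) (h1 : i < a.length) :
    (PySem.List.slice a none (some i) ++ PySem.List.slice a (some (i + 1)) none).length
      = a.length - 1 := by
  rw [pvErase_eq a i h0]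
  simp [List.length_take, List.length_drop]
  omega

-- A yields nothing when n exceeds the pool size
theorem pvNil (r : Nat) : ∀ a : List Int, a.length < r → selections_py a (r : Int) = [] := by
  induction r with
  | zero => intro a h; omega
  | succ k ih =>
      intro a h
      rw [selections_py]
      have hr : ¬ ((k : Int) + 1 ≤ 0) := by omega
      simp only [Nat.cast_add, Nat.cast_one, hr, if_false]
      rw [List.flatMap_eq_nil_iff]
      intro i hi
      rw [PySem.List.mem_pyRange_one] at hi
      have hlen := pvErase_length a i hi.1 hi.2
      have : (k : Int) + 1 - 1 = ((k : Nat) : Int) := by omega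
      rw [this, ih _ (by omega)]
      simp

-- loop invariant: after r expansion steps, the chosen parts are exactly the recursive
-- enumeration of length-r selections from each state's remaining pool, prefixed by its chosen part
theorem pvInv (r : Nat) : ∀ states : List (List Int × List Int),
    (pvExpand r states).map Prod.fst
      = states.flatMap (fun cr => (selections_py cr.2 (r : Int)).map (cr.1 ++ ·)) := by
  induction r with
  | zero =>
      intro states
      rw [pvExpand]
      have h0 : ∀ b : List Int, selections_py b (0 : Int) = [[]] := by
        intro b; rw [selections_py]; simp
      simp [h0, List.map_eq_flatMap]
  | succ k ih =>
      intro states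
      rw [pvExpand, ih, pvStep, List.flatMap_assoc]
      congr 1
      funext cr
      rw [List.flatMap_map]
      conv_rhs => rw [selections_py]
      have hr : ¬ ((k : Int) + 1 ≤ 0) := by omega
      simp only [Nat.cast_add, Nat.cast_one, hr, if_false]
      rw [List.map_flatMap]
      congr 1
      funext i
      have : (k : Int) + 1 - 1 = ((k : Nat) : Int) := by omega
      rw [this]
      simp [List.map_map, Function.comp_def]

-- ===== VERDICT (by name: the statement is the Claim_ definition above) =====
theorem selections_py_spec : Claim_equal_selections_py := by
  intro a n _dom
  unfold Spec_selections_py selections_py_alt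
  by_cases hn : n ≤ 0
  · rw [selections_py]; simp [hn]
  · simp only [hn, if_false]
    by_cases hlen : (a.length : Int) < n
    · simp only [hlen, if_true]
      have hn' : ((n.toNat : Nat) : Int) = n := by omega
      rw [← hn', pvNil n.toNat a (by omega)]
    · simp only [hlen, if_false]
      rw [pvInv n.toNat [([], a)]]
      have hn' : ((n.toNat : Nat) : Int) = n := by omega
      simp [hn']
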